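-- pv_equiv track=rewrite | github.com/Moon-TsoLan/new-ai-sales | src/shap_association_explain.py | _clean_wordpiece
-- ===== SOURCE A (Python) =====
-- from typing import Dict, List
--
-- def _clean_wordpiece(tokens: List[str]) -> str:
--     out = ""
--     for token in tokens:
--         if token.startswith("##"):
--             out += token[2:]
--         elif out:
--             out += " " + token
--         else:
--             out = token
--     return out.strip()
-- ===== SOURCE B (Python) =====
-- from typing import List
--
-- def _clean_wordpiece(tokens: List[str]) -> str:
--     words: List[str] = []
--     for token in tokens:
--         if token.startswith("##"):
--             if words:
--                 words[-1] += token[2:]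
--             else:
--                 words.append(token[2:])
--         else:
--             words.append(token)
--     return " ".join(words).strip()
-- ===== Notes on version B (the rewrite author's own statement) =====
-- stated objective: idiomatic
-- what changed: B builds a list of words (merging '##' pieces into the last word) and defers all spacing to a single ' '.join(...).strip(), instead of A's three-way branch that concatenates into one string with an emptiness guard.
import Mathlib
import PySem

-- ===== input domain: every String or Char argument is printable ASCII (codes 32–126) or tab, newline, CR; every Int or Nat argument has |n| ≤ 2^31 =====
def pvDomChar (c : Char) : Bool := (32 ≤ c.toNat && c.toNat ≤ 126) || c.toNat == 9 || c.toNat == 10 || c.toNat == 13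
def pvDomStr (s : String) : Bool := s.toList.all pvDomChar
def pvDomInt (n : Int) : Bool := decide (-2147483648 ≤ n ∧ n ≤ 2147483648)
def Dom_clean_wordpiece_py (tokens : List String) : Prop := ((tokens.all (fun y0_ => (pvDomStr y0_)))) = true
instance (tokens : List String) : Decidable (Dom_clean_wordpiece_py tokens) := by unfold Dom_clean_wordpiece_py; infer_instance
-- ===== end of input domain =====

-- B joins a word list instead of A's guarded string concatenation: same value, more idiomatic.

-- ===== PORT A =====
-- out += token[2:] / out += " " + token / out = token, over code points; '.strip()' = PySem.Chars.strip
def clean_wordpiece_py (tokens : List String) : String :=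
  String.mk (PySem.Chars.strip (tokens.foldl (fun out token =>
    if PySem.Str.startswith token "##" then
      out ++ PySem.Chars.slice token.toList (some 2) none
    else if out ≠ [] then
      out ++ ' ' :: token.toList
    else
      token.toList) []))

-- ===== PORT B =====
-- words : list of words (as List Char); '##' pieces extend the last word; ' '.join(words).strip()
def clean_wordpiece_py_alt (tokens : List String) : String :=
  let words := tokens.foldl (fun ws token =>
    if PySem.Str.startswith token "##" then
      if ws ≠ [] then
        ws.dropLast ++ [ws.getLast! ++ PySem.Chars.slice token.toList (some 2) none]
      else
        [PySem.Chars.slice token.toList (some 2) none]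
    else
      ws ++ [token.toList]) ([] : List (List Char))
  String.mk (PySem.Chars.strip (PySem.Chars.join [' '] words))

-- ===== PRECONDITION & SPEC =====
def Spec_clean_wordpiece_py (tokens : List String) (out : String) : Prop := out = clean_wordpiece_py_alt tokens
instance (tokens : List String) (out : String) : Decidable (Spec_clean_wordpiece_py tokens out) := by unfold Spec_clean_wordpiece_py; infer_instance

-- ===== CLAIM (what is proved, stated in full; the proofs are below) =====
def Claim_equal_clean_wordpiece_py : Prop := ∀ (tokens : List String), Dom_clean_wordpiece_py tokens → Spec_clean_wordpiece_py tokens (clean_wordpiece_py tokens)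

-- ===== LEMMAS AND PROOFS =====

-- invariant relating A's string accumulator with B's word list: either both are empty,
-- or ' '.join(ws) is out preceded by an all-space prefix
def pvInv (out : List Char) (ws : List (List Char)) : Prop :=
  (ws = [] ∧ out = []) ∨
  (ws ≠ [] ∧ ∃ S : List Char, (∀ c ∈ S, c = ' ') ∧ PySem.Chars.join [' '] ws = S ++ out)

theorem pv_join_append_singleton (sep : List Char) (ws : List (List Char)) (w : List Char)
    (h : ws ≠ []) :
    PySem.Chars.join sep (ws ++ [w]) = PySem.Chars.join sep ws ++ sep ++ w := by
  induction ws with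
  | nil => exact absurd rfl h
  | cons x rest ih =>
    cases rest with
    | nil => simp [PySem.Chars.join, List.intercalate]
    | cons y t =>
      have h1 : (x :: y :: t) ++ [w] = x :: (y :: (t ++ [w])) := by simp
      have h2 : y :: (t ++ [w]) = (y :: t) ++ [w] := by simp
      rw [h1, PySem.Chars.join_cons_cons, h2, ih (by simp), PySem.Chars.join_cons_cons]
      simp [List.append_assoc]

theorem pv_join_extend_last (sep : List Char) (ws : List (List Char)) (suf : List Char)
    (h : ws ≠ []) :
    PySem.Chars.join sep (ws.dropLast ++ [ws.getLast! ++ suf]) =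
      PySem.Chars.join sep ws ++ suf := by
  induction ws with
  | nil => exact absurd rfl h
  | cons x rest ih =>
    cases rest with
    | nil => simp [PySem.Chars.join, List.intercalate]
    | cons y t =>
      have hne : (y :: t) ≠ ([] : List (List Char)) := by simp
      have hne2 : ((y :: t).dropLast ++ [(y :: t).getLast! ++ suf]) ≠ ([] : List (List Char)) := by
        simp
      obtain ⟨z, zs, hz⟩ := List.exists_cons_of_ne_nil hne2
      have hgl : (x :: y :: t).getLast! = (y :: t).getLast! := rfl
      rw [show (x :: y :: t).dropLast ++ [(x :: y :: t).getLast! ++ suf] =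
            x :: ((y :: t).dropLast ++ [(y :: t).getLast! ++ suf]) by
          rw [List.dropLast_cons₂, hgl]; simp]
      rw [hz, PySem.Chars.join_cons_cons, ← hz, ih hne, PySem.Chars.join_cons_cons]
      simp [List.append_assoc]

theorem pv_strip_space_prefix (S out : List Char) (hS : ∀ c ∈ S, c = ' ') :
    PySem.Chars.strip (S ++ out) = PySem.Chars.strip out := by
  have hdw : List.dropWhile PySem.Chars.isspace S = [] := by
    rw [List.dropWhile_eq_nil_iff]
    intro c hc
    rw [hS c hc]; decide
  simp [PySem.Chars.strip, PySem.Chars.lstrip, List.dropWhile_append, hdw]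

-- one token preserves the invariant
theorem pv_step (out : List Char) (ws : List (List Char)) (t : String) (h : pvInv out ws) :
    pvInv
      (if PySem.Str.startswith t "##" then
        out ++ PySem.Chars.slice t.toList (some 2) none
       else if out ≠ [] then out ++ ' ' :: t.toList else t.toList)
      (if PySem.Str.startswith t "##" then
        if ws ≠ [] then
          ws.dropLast ++ [ws.getLast! ++ PySem.Chars.slice t.toList (some 2) none]
        else [PySem.Chars.slice t.toList (some 2) none]
       else ws ++ [t.toList]) := by
  set suf := PySem.Chars.slice t.toList (some 2) none with hsuf
  by_cases hsw : PySem.Str.startswith t "##"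
  · simp only [hsw, if_true]
    rcases h with ⟨hws, hout⟩ | ⟨hws, S, hS, hj⟩
    · subst hws; subst hout
      simp only [ne_eq, not_true_eq_false, reduceIte, List.nil_append]
      exact Or.inr ⟨by simp, [], by simp, by simp [PySem.Chars.join, List.intercalate]⟩
    · simp only [hws, ne_eq, not_false_eq_true, if_true]
      refine Or.inr ⟨by simp, S, hS, ?_⟩
      rw [pv_join_extend_last _ _ _ hws, hj, List.append_assoc]
  · rw [Bool.not_eq_true] at hsw
    simp only [hsw, Bool.false_eq_true, if_false]
    by_cases hout : out = []
    · subst hout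
      simp only [ne_eq, not_true_eq_false, reduceIte]
      by_cases hws : ws = []
      · subst hws
        exact Or.inr ⟨by simp, [], by simp, by simp [PySem.Chars.join, List.intercalate]⟩
      · refine Or.inr ⟨by simp, ?_⟩
        rcases h with ⟨h1, _⟩ | ⟨_, S, hS, hj⟩
        · exact absurd h1 hws
        · refine ⟨S ++ [' '], ?_, ?_⟩
          · intro c hc
            rcases List.mem_append.mp hc with h' | h'
            · exact hS c h'
            · simpa using h'
          · rw [pv_join_append_singleton _ _ _ hws, hj]
            simp
    · simp only [ne_eq, hout, not_false_eq_true, if_true]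
      rcases h with ⟨_, h2⟩ | ⟨hws, S, hS, hj⟩
      · exact absurd h2 hout
      · refine Or.inr ⟨by simp, S, hS, ?_⟩
        rw [pv_join_append_singleton _ _ _ hws, hj]
        simp

theorem pv_final (out : List Char) (ws : List (List Char)) (h : pvInv out ws) :
    PySem.Chars.strip (PySem.Chars.join [' '] ws) = PySem.Chars.strip out := by
  rcases h with ⟨hws, hout⟩ | ⟨_, S, hS, hj⟩
  · subst hws; subst hout; rfl
  · rw [hj]; exact pv_strip_space_prefix S out hS

theorem pv_fold (tokens : List String) (out : List Char) (ws : List (List Char))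
    (h : pvInv out ws) :
    pvInv
      (tokens.foldl (fun out token =>
        if PySem.Str.startswith token "##" then
          out ++ PySem.Chars.slice token.toList (some 2) none
        else if out ≠ [] then out ++ ' ' :: token.toList else token.toList) out)
      (tokens.foldl (fun ws token =>
        if PySem.Str.startswith token "##" then
          if ws ≠ [] then
            ws.dropLast ++ [ws.getLast! ++ PySem.Chars.slice token.toList (some 2) none]
          else [PySem.Chars.slice token.toList (some 2) none]
        else ws ++ [token.toList]) ws) := by
  induction tokens generalizing out ws with
  | nil => exact h
  | cons t rest ih =>
    simp only [List.foldl_cons]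
    exact ih _ _ (pv_step out ws t h)

-- ===== VERDICT (by name: the statement is the Claim_ definition above) =====
theorem clean_wordpiece_py_spec : Claim_equal_clean_wordpiece_py := by
  intro tokens _
  unfold Spec_clean_wordpiece_py clean_wordpiece_py clean_wordpiece_py_alt
  have := pv_fold tokens [] [] (Or.inl ⟨rfl, rfl⟩)
  exact congrArg String.mk (pv_final _ _ this).symm
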